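-- pv_equiv track=rewrite | github.com/e-makarenko/python-dqe-course | module_4_functions/task_module_2.py | find_duplicate_keys_and_their_max_values
-- ===== SOURCE A (Python) =====
-- def find_duplicate_keys_and_their_max_values(list_of_dicts):
--     new_dict = {}
--     keys_with_max_values_list = []
--
--     for dict_index, dictionary in enumerate(list_of_dicts, start=1):
--         for key, value in dictionary.items():
--             if key in new_dict:
--                 if value > new_dict[key][0]:
--                     new_dict[key] = (value, dict_index)
--                 keys_with_max_values_list.append(key)
--             else:
--                 new_dict[key] = (value, dict_index)
--     return keys_with_max_values_list, new_dict
-- ===== SOURCE B (Python) =====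
-- def find_duplicate_keys_and_their_max_values(list_of_dicts):
--     # Staged passes: flatten all (key, value, dict_index) triples once, then
--     # compute the duplicate list from the key stream, then build new_dict by
--     # taking, per first-seen key, the max of its occurrences (first max wins).
--     flat = [(k, v, i) for i, d in enumerate(list_of_dicts, 1) for k, v in d.items()]
--     seen, dups = [], []
--     for k, _, _ in flat:
--         if k in seen:
--             dups.append(k)
--         else:
--             seen.append(k)
--     new_dict = {k: max(((v, i) for k2, v, i in flat if k2 == k), key=lambda e: e[0])
--                 for k in seen}
--     return dups, new_dict
-- ===== Notes on version B (the rewrite author's own statement) =====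
-- stated objective: alternative
-- what changed: B replaces A's single-pass dict with a running max by staged passes: it flattens all (key, value, dict_index) triples into one list, derives the duplicate list from the key stream with a seen-list, and builds new_dict afterwards by filtering the flat list per first-seen key and taking max by value (first maximum kept).
import Mathlib
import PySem

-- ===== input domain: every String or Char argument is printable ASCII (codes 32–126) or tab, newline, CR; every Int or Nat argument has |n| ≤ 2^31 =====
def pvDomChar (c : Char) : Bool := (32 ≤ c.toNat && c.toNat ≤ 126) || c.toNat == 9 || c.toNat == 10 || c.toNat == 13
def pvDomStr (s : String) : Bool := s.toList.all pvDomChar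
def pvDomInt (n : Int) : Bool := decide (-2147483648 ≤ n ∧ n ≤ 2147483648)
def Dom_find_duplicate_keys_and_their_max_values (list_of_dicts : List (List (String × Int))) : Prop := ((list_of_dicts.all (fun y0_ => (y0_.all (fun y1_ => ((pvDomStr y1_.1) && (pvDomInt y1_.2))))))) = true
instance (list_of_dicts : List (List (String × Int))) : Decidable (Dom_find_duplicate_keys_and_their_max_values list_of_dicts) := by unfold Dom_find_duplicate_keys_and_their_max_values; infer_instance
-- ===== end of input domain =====

-- B replaces A's single-pass dict-with-running-max by staged passes over a flattened
-- (key, value, dict_index) list: duplicates from the key stream, then a per-key filter+max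
-- (objective: alternative decomposition, same result).

-- ===== PORT A =====
-- inner-loop body of A: one (key, value) pair at dict index i
def pvStepA (i : Int) (t : PySem.Dict String (Int × Int) × List String) (kv : String × Int) :
    PySem.Dict String (Int × Int) × List String :=
  if t.1.contains kv.1 then
    (if kv.2 > (t.1.getD kv.1 (0, 0)).1 then t.1.insert kv.1 (kv.2, i) else t.1, t.2 ++ [kv.1])
  else
    (t.1.insert kv.1 (kv.2, i), t.2)

def find_duplicate_keys_and_their_max_values (list_of_dicts : List (List (String × Int))) :
    List String × (List (String × Int × Int)) :=
  let st := (PySem.List.enumerate list_of_dicts 1).foldl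
    (fun s di => di.2.foldl (pvStepA di.1) s) (PySem.Dict.empty, [])
  (st.2, st.1.items)

-- ===== PORT B =====
-- flat = [(k, v, i) for i, d in enumerate(list_of_dicts, 1) for k, v in d.items()]
def pvFlat (list_of_dicts : List (List (String × Int))) : List (String × Int × Int) :=
  (PySem.List.enumerate list_of_dicts 1).flatMap
    (fun di => di.2.map (fun kv => (kv.1, kv.2, di.1)))

-- the seen/dups scan over the key stream
def pvSDStep (sd : List String × List String) (k : String) : List String × List String :=
  if k ∈ sd.1 then (sd.1, sd.2 ++ [k]) else (sd.1 ++ [k], sd.2)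

def pvSeenDups (ks : List String) : List String × List String :=
  ks.foldl pvSDStep ([], [])

-- max(((v, i) for k2, v, i in flat if k2 == k), key=lambda e: e[0]); flat always
-- contains k where this is used, so the generator is nonempty
def pvBest (k : String) (flat : List (String × Int × Int)) : Int × Int :=
  (PySem.List.max? ((flat.filter (fun t => t.1 == k)).map (fun t => t.2))
    (fun e => e.1)).getD (0, 0)

def find_duplicate_keys_and_their_max_values_alt (list_of_dicts : List (List (String × Int))) :
    List String × (List (String × Int × Int)) :=
  let flat := pvFlat list_of_dicts
  let sd := pvSeenDups (flat.map (fun t => t.1))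
  (sd.2, sd.1.map (fun k => (k, pvBest k flat)))

-- ===== PRECONDITION & SPEC =====
def Spec_find_duplicate_keys_and_their_max_values (list_of_dicts : List (List (String × Int))) (out : List String × (List (String × Int × Int))) : Prop := out = find_duplicate_keys_and_their_max_values_alt list_of_dicts
instance (list_of_dicts : List (List (String × Int))) (out : List String × (List (String × Int × Int))) : Decidable (Spec_find_duplicate_keys_and_their_max_values list_of_dicts out) := by unfold Spec_find_duplicate_keys_and_their_max_values; infer_instance

-- ===== CLAIM =====
def Claim_equal_find_duplicate_keys_and_their_max_values : Prop := ∀ (list_of_dicts : List (List (String × Int))), Dom_find_duplicate_keys_and_their_max_values list_of_dicts → Spec_find_duplicate_keys_and_their_max_values list_of_dicts (find_duplicate_keys_and_their_max_values list_of_dicts)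

-- ===== LEMMAS AND PROOFS =====

-- A's step viewed on flattened triples
def pvStepA1 (s : PySem.Dict String (Int × Int) × List String) (t : String × Int × Int) :
    PySem.Dict String (Int × Int) × List String :=
  pvStepA t.2.2 s (t.1, t.2.1)

lemma pvInner_flat (i : Int) (l : List (String × Int)) (s : PySem.Dict String (Int × Int) × List String) :
    l.foldl (pvStepA i) s = (l.map (fun kv => (kv.1, kv.2, i))).foldl pvStepA1 s := by
  induction l generalizing s with
  | nil => rfl
  | cons kv rest ih => simpa [pvStepA1] using ih (pvStepA i s kv)

lemma pvOuter_flat (l : List (Int × List (String × Int))) (s : PySem.Dict String (Int × Int) × List String) :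
    l.foldl (fun s di => di.2.foldl (pvStepA di.1) s) s
      = (l.flatMap (fun di => di.2.map (fun kv => (kv.1, kv.2, di.1)))).foldl pvStepA1 s := by
  induction l generalizing s with
  | nil => rfl
  | cons di rest ih =>
    rw [List.foldl_cons, ih, pvInner_flat, List.flatMap_cons, List.foldl_append]

lemma pvSD_append (ks : List String) (k : String) :
    pvSeenDups (ks ++ [k]) = pvSDStep (pvSeenDups ks) k := by
  simp [pvSeenDups, List.foldl_append]

lemma pvSD_mem (ks : List String) (k : String) : k ∈ (pvSeenDups ks).1 ↔ k ∈ ks := by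
  induction ks using List.reverseRecOn with
  | nil => simp [pvSeenDups]
  | append_singleton ks x ih =>
    rw [pvSD_append]
    by_cases h : x ∈ (pvSeenDups ks).1
    · simp only [pvSDStep, h, if_true]
      constructor
      · intro hk; exact List.mem_append.2 (Or.inl (ih.1 hk))
      · intro hk
        rcases List.mem_append.1 hk with hk | hk
        · exact ih.2 hk
        · simp only [List.mem_singleton] at hk; exact hk ▸ h
    · simp [pvSDStep, h, ih]

lemma pvBest_append_ne (k : String) (p : List (String × Int × Int)) (x : String × Int × Int)
    (h : x.1 ≠ k) : pvBest k (p ++ [x]) = pvBest k p := by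
  simp [pvBest, List.filter_append, h]

lemma pvBest_append_self (k : String) (p : List (String × Int × Int)) (x : String × Int × Int)
    (hx : x.1 = k) (hne : (p.filter (fun t => t.1 == k)) ≠ []) :
    pvBest k (p ++ [x]) = if (pvBest k p).1 < x.2.1 then x.2 else pvBest k p := by
  obtain ⟨m, hm⟩ : ∃ m, PySem.List.max? ((p.filter (fun t => t.1 == k)).map (fun t => t.2))
      (fun e => e.1) = some m := by
    cases h : PySem.List.max? ((p.filter (fun t => t.1 == k)).map (fun t => t.2)) (fun e => e.1) with
    | none =>
      have := (PySem.List.max?_eq_none_iff _ _).1 h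
      simp only [List.map_eq_nil_iff] at this
      exact absurd this hne
    | some m => exact ⟨m, rfl⟩
  have hfx : (([x] : List (String × Int × Int)).filter (fun t => t.1 == k)) = [x] := by simp [hx]
  simp only [pvBest, List.filter_append, hfx, List.map_append, List.map_cons, List.map_nil]
  simp only [PySem.List.max?] at hm ⊢
  rw [List.foldl_append, hm]
  simp only [List.foldl]
  by_cases h : m.1 < x.2.1 <;> simp [h]

-- entries for a key are nonempty once the key has occurred
lemma pvFilter_ne_nil (k : String) (p : List (String × Int × Int)) (h : k ∈ p.map (fun t => t.1)) :
    p.filter (fun t => t.1 == k) ≠ [] := by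
  obtain ⟨t, ht, hk⟩ := List.mem_map.1 h
  intro hnil
  have : t ∈ p.filter (fun t => t.1 == k) := List.mem_filter.2 ⟨ht, by simp [hk]⟩
  simp [hnil] at this

-- the characterization of A's fold state after processing a prefix p of the flat list
def pvChar (p : List (String × Int × Int)) (st : PySem.Dict String (Int × Int) × List String) : Prop :=
  st.1.keys.Nodup ∧
  st.1.items = (pvSeenDups (p.map (fun t => t.1))).1.map (fun k => (k, pvBest k p)) ∧
  st.2 = (pvSeenDups (p.map (fun t => t.1))).2

lemma pvFoldA_char (p : List (String × Int × Int)) :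
    pvChar p (p.foldl pvStepA1 (PySem.Dict.empty, [])) := by
  induction p using List.reverseRecOn with
  | nil =>
    refine ⟨?_, ?_, rfl⟩ <;> simp [PySem.Dict.empty, PySem.Dict.keys, pvSeenDups]
  | append_singleton p x ih =>
    obtain ⟨hnd, hit, hdup⟩ := ih
    rw [List.foldl_append]
    set st := p.foldl pvStepA1 (PySem.Dict.empty, ([] : List String)) with hst
    set seen := (pvSeenDups (p.map (fun t => t.1))).1 with hseen
    set dups := (pvSeenDups (p.map (fun t => t.1))).2 with hdups
    have hkeys : st.1.keys = seen := by
      simp [PySem.Dict.keys, hit, Function.comp_def]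
    have hmapkey : (p ++ [x]).map (fun t => t.1) = p.map (fun t => t.1) ++ [x.1] := by simp
    unfold pvChar
    rw [hmapkey, pvSD_append]
    by_cases hc : x.1 ∈ seen
    · -- key already seen: A updates the running max in place
      have hsd : pvSDStep (pvSeenDups (p.map (fun t => t.1))) x.1 = (seen, dups ++ [x.1]) := by
        simp [pvSDStep, ← hseen, ← hdups, hc]
      rw [hsd]
      have hcont : st.1.contains x.1 = true := by
        rw [PySem.Dict.contains_eq_decide_mem_keys, hkeys]; simpa using hc
      have hmem : (x.1, pvBest x.1 p) ∈ st.1.items := by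
        rw [hit]; exact List.mem_map.2 ⟨x.1, hc, rfl⟩
      have hgetD : st.1.getD x.1 (0, 0) = pvBest x.1 p :=
        PySem.Dict.getD_of_mem_items st.1 hmem hnd _
      have hfil : p.filter (fun t => t.1 == x.1) ≠ [] :=
        pvFilter_ne_nil x.1 p ((pvSD_mem _ _).1 hc)
      have hbx := pvBest_append_self x.1 p x rfl hfil
      refine ⟨?_, ?_, ?_⟩
      · simp only [List.foldl_cons, List.foldl_nil, pvStepA1, pvStepA, hcont, if_true]
        by_cases hlt : x.2.1 > (st.1.getD x.1 (0,0)).1 <;>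
          simp [hlt, PySem.Dict.nodup_keys_insert, hnd]
      · simp only [List.foldl_cons, List.foldl_nil, pvStepA1, pvStepA, hcont, if_true, hgetD]
        by_cases hlt : x.2.1 > (pvBest x.1 p).1
        · simp only [hlt, if_true]
          rw [PySem.Dict.items_insert_of_contains _ _ hcont, hit, List.map_map]
          apply List.map_congr_left
          intro k hk
          by_cases hkx : k = x.1
          · subst hkx
            simp only [Function.comp, beq_self_eq_true, if_true]
            rw [hbx, if_pos (by exact hlt)]
          · have hbk : (k == x.1) = false := by simp [hkx]
            simp [Function.comp, hbk, pvBest_append_ne k p x (fun h => hkx h.symm)]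
        · simp only [hlt, if_false]
          rw [hit]
          apply List.map_congr_left
          intro k hk
          by_cases hkx : k = x.1
          · subst hkx
            rw [hbx, if_neg (by simpa using hlt)]
          · simp [pvBest_append_ne k p x (fun h => hkx h.symm)]
      · simp [List.foldl_cons, List.foldl_nil, pvStepA1, pvStepA, hcont, hdup]
    · -- fresh key: A appends a new entry
      have hsd : pvSDStep (pvSeenDups (p.map (fun t => t.1))) x.1 = (seen ++ [x.1], dups) := by
        simp [pvSDStep, ← hseen, ← hdups, hc]
      rw [hsd]
      have hcont : st.1.contains x.1 = false := by
        rw [PySem.Dict.contains_eq_decide_mem_keys, hkeys]; simpa using hc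
      have hnofil : p.filter (fun t => t.1 == x.1) = [] := by
        rw [List.filter_eq_nil_iff]
        intro t ht hk
        exact hc ((pvSD_mem _ _).2 (List.mem_map.2 ⟨t, ht, by simpa using hk⟩))
      refine ⟨?_, ?_, ?_⟩
      · simp [List.foldl_cons, List.foldl_nil, pvStepA1, pvStepA, hcont, PySem.Dict.nodup_keys_insert, hnd]
      · simp only [List.foldl_cons, List.foldl_nil, pvStepA1, pvStepA, hcont, Bool.false_eq_true, if_false]
        rw [PySem.Dict.items_insert_of_not_contains _ _ hcont, hit, List.map_append]
        congr 1
        · apply List.map_congr_left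
          intro k hk
          have hkx : x.1 ≠ k := fun h => hc (h ▸ hk)
          simp [pvBest_append_ne k p x hkx]
        · have : pvBest x.1 (p ++ [x]) = x.2 := by
            simp [pvBest, List.filter_append, hnofil, PySem.List.max?]
          simp [this]
      · simp [List.foldl_cons, List.foldl_nil, pvStepA1, pvStepA, hcont, hdup]

-- ===== VERDICT =====
theorem find_duplicate_keys_and_their_max_values_spec : Claim_equal_find_duplicate_keys_and_their_max_values := by
  intro lds _
  unfold Spec_find_duplicate_keys_and_their_max_values
  unfold find_duplicate_keys_and_their_max_values find_duplicate_keys_and_their_max_values_alt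
  rw [pvOuter_flat]
  obtain ⟨_, hit, hdup⟩ := pvFoldA_char (pvFlat lds)
  simp only [pvFlat] at *
  exact Prod.ext hdup hit
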